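-- pv_equiv track=rewrite | github.com/marciofcruz/rpa | ExtairGFD/ExtairGFD.py | get_nome_arquivo_tipo_de_valor
-- ===== SOURCE A (Python) =====
-- def get_nome_arquivo_tipo_de_valor(numero_pagina, texto):
--
--   linhas = texto.split('\n')
--
--   vencimento = ''
--   cnpj_primeiro = ''
--   cnpj_ultimo = ''
--   cnpj = ''
--
--   cont_linha = 0
--   for linha in linhas:
--     elementos = linha.split(' ')
--
--     if cont_linha==1:
--       vencimento = elementos[0]
--     else:
--       auxiliar = elementos[0]
--       auxiliar = auxiliar.upper()
--
--       if auxiliar.find('TRABALHADORES')>=0: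
--         cnpj = auxiliar[-7:].strip()
--
--         cnpj = cnpj.replace('-','')
--
--         if cnpj.isdigit():
--           if cnpj_primeiro == '':
--             cnpj_primeiro = cnpj
--             cnpj_ultimo = cnpj
--           else:
--             cnpj_ultimo = cnpj
--
--     cont_linha+=1
--
--   nome_arquivo = 'Relação de Tipos de Valor '+vencimento.replace('/','-')
--
--   if cnpj_primeiro == '':
--     nome_arquivo = nome_arquivo+' página '+str(numero_pagina)+'.pdf'
--   else:
--     nome_arquivo = nome_arquivo+' '+cnpj_primeiro+' a '+cnpj_ultimo+ '.pdf'
--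
--   return nome_arquivo
-- ===== SOURCE B (Python) =====
-- def get_nome_arquivo_tipo_de_valor(numero_pagina, texto):
--   linhas = texto.split('\n')
--   vencimento = linhas[1].split(' ')[0] if len(linhas) > 1 else ''
--   prefixo = 'Relação de Tipos de Valor ' + vencimento.replace('/', '-')
--   pares = list(enumerate(linhas))
--   primeiro = _busca_cnpj(pares)
--   if primeiro is None:
--     return prefixo + ' página ' + str(numero_pagina) + '.pdf'
--   ultimo = _busca_cnpj(reversed(pares))
--   return prefixo + ' ' + primeiro + ' a ' + ultimo + '.pdf'
--
--
-- def _busca_cnpj(pares):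
--   for i, linha in pares:
--     if i != 1:
--       cnpj = _extrai_cnpj(linha)
--       if cnpj is not None:
--         return cnpj
--   return None
--
--
-- def _extrai_cnpj(linha):
--   token = linha.split(' ')[0].upper()
--   if token.find('TRABALHADORES') >= 0:
--     cnpj = token[-7:].strip().replace('-', '')
--     if cnpj.isdigit():
--       return cnpj
--   return None
-- ===== Notes on version B (the rewrite author's own statement) =====
-- stated objective: simpler
-- what changed: Replaces A's single stateful pass (line counter plus first/last trackers) by direct indexing for the vencimento line and two independent early-exit searches: a forward scan returning the first valid cnpj and a scan of the reversed (index,line) list returning the last one.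
import Mathlib
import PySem

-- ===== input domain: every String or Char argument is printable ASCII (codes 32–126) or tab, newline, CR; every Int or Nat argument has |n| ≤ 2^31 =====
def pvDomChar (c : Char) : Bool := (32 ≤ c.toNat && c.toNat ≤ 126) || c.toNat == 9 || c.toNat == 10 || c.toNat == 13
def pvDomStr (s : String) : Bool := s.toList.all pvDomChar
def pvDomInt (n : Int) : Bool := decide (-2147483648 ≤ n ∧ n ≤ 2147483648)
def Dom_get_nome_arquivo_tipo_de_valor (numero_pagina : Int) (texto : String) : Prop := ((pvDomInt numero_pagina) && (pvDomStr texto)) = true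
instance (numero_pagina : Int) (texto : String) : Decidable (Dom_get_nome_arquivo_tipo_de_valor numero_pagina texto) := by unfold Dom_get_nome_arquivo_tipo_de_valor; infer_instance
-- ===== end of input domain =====

-- B replaces A's single stateful five-variable pass by direct indexing for the vencimento line plus
-- two independent short-circuiting scans: a forward scan for the first valid cnpj and a scan of the
-- reversed line list for the last one (objective: simpler).


-- ===== PORT A =====
-- s.split(sep) for a non-empty literal sep (PySem.Str.split? is none only for sep = "")
def pvSplit (s sep : String) : List String := (PySem.Str.split? s sep).getD []

-- A's loop body; Python's locals `elementos`/`auxiliar`/`cnpj` are assigned before every read in an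
-- iteration and never read across iterations, so they appear inline; the carried state is
-- (vencimento, cnpj_primeiro, cnpj_ultimo, cont_linha).  aux[-7:].strip().replace('-','') appears
-- written out at each of its uses.
def pvStepA (s : String × String × String × Int) (linha : String) : String × String × String × Int :=
  match s with
  | (venc, cp, cu, cont) =>
    if cont == 1 then
      ((pvSplit linha " ").headD "", cp, cu, cont + 1)
    else
      if PySem.Str.find (PySem.Str.upper ((pvSplit linha " ").headD "")) "TRABALHADORES" ≥ 0 then
        if PySem.Str.strIsdigit (PySem.Str.replace (PySem.Str.strip (PySem.Str.slice (PySem.Str.upper ((pvSplit linha " ").headD "")) (some (-7)) none)) "-" "") then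
          if cp == "" then
            (venc,
             PySem.Str.replace (PySem.Str.strip (PySem.Str.slice (PySem.Str.upper ((pvSplit linha " ").headD "")) (some (-7)) none)) "-" "",
             PySem.Str.replace (PySem.Str.strip (PySem.Str.slice (PySem.Str.upper ((pvSplit linha " ").headD "")) (some (-7)) none)) "-" "",
             cont + 1)
          else
            (venc, cp,
             PySem.Str.replace (PySem.Str.strip (PySem.Str.slice (PySem.Str.upper ((pvSplit linha " ").headD "")) (some (-7)) none)) "-" "",
             cont + 1)
        else (venc, cp, cu, cont + 1)
      else (venc, cp, cu, cont + 1)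

def get_nome_arquivo_tipo_de_valor (numero_pagina : Int) (texto : String) : String :=
  let linhas := pvSplit texto "\n"
  match linhas.foldl pvStepA ("", "", "", 0) with
  | (vencimento, cnpj_primeiro, cnpj_ultimo, _) =>
    let nome_arquivo := "Relação de Tipos de Valor " ++ PySem.Str.replace vencimento "/" "-"
    if cnpj_primeiro == "" then
      nome_arquivo ++ " página " ++ PySem.Int.toStr numero_pagina ++ ".pdf"
    else
      nome_arquivo ++ " " ++ cnpj_primeiro ++ " a " ++ cnpj_ultimo ++ ".pdf"

-- ===== PORT B =====
-- Source B's _extrai_cnpj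
def pvExtrairCnpj (linha : String) : Option String :=
  if PySem.Str.find (PySem.Str.upper ((pvSplit linha " ").headD "")) "TRABALHADORES" ≥ 0 then
    if PySem.Str.strIsdigit (PySem.Str.replace (PySem.Str.strip (PySem.Str.slice (PySem.Str.upper ((pvSplit linha " ").headD "")) (some (-7)) none)) "-" "") then
      some (PySem.Str.replace (PySem.Str.strip (PySem.Str.slice (PySem.Str.upper ((pvSplit linha " ").headD "")) (some (-7)) none)) "-" "")
    else none
  else none

-- Source B's _busca_cnpj: early-exit scan over (index, line) pairs
def pvBusca : List (Int × String) → Option String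
  | [] => none
  | p :: rest =>
    if p.1 != 1 then
      match pvExtrairCnpj p.2 with
      | some c => some c
      | none => pvBusca rest
    else pvBusca rest

def get_nome_arquivo_tipo_de_valor_alt (numero_pagina : Int) (texto : String) : String :=
  let linhas := pvSplit texto "\n"
  let vencimento := if 1 < linhas.length then (pvSplit (linhas.getD 1 "") " ").headD "" else ""
  let prefixo := "Relação de Tipos de Valor " ++ PySem.Str.replace vencimento "/" "-"
  let pares := PySem.List.enumerate linhas 0
  match pvBusca pares with
  | none => prefixo ++ " página " ++ PySem.Int.toStr numero_pagina ++ ".pdf"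
  | some primeiro =>
      -- _busca_cnpj(reversed(pares)) is never None here; .getD "" is the unreachable-None default
      prefixo ++ " " ++ primeiro ++ " a " ++ (pvBusca pares.reverse).getD "" ++ ".pdf"

-- ===== PRECONDITION & SPEC =====
def Spec_get_nome_arquivo_tipo_de_valor (numero_pagina : Int) (texto : String) (out : String) : Prop := out = get_nome_arquivo_tipo_de_valor_alt numero_pagina texto
instance (numero_pagina : Int) (texto : String) (out : String) : Decidable (Spec_get_nome_arquivo_tipo_de_valor numero_pagina texto out) := by unfold Spec_get_nome_arquivo_tipo_de_valor; infer_instance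

-- ===== CLAIM (what is proved, stated in full; the proofs are below) =====
def Claim_equal_get_nome_arquivo_tipo_de_valor : Prop := ∀ (numero_pagina : Int) (texto : String), Dom_get_nome_arquivo_tipo_de_valor numero_pagina texto → Spec_get_nome_arquivo_tipo_de_valor numero_pagina texto (get_nome_arquivo_tipo_de_valor numero_pagina texto)

-- ===== LEMMAS AND PROOFS =====

set_option maxHeartbeats 1000000

-- the list of valid cnpjs contributed by `rest` when the first line of `rest` has index k
def pvNewList (k : Nat) : List String → List String
  | [] => []
  | l :: t =>
    if k = 1 then pvNewList 2 t
    else match pvExtrairCnpj l with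
      | some c => c :: pvNewList (k + 1) t
      | none => pvNewList (k + 1) t

-- the vencimento after processing `rest` starting at index k, given current value venc
def pvVenc (k : Nat) (rest : List String) (venc : String) : String :=
  match k, rest with
  | 0, _ :: b :: _ => (pvSplit b " ").headD ""
  | 1, a :: _ => (pvSplit a " ").headD ""
  | _, _ => venc

def pvG (p : Int × String) : Option String :=
  if p.1 = 1 then none else pvExtrairCnpj p.2

lemma pvNewList_cons_one (l : String) (t : List String) :
    pvNewList 1 (l :: t) = pvNewList 2 t := by
  rw [pvNewList]
  simp

lemma pvNewList_cons (k : Nat) (hk : k ≠ 1) (l : String) (t : List String) :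
    pvNewList k (l :: t) =
      match pvExtrairCnpj l with
      | some c => c :: pvNewList (k + 1) t
      | none => pvNewList (k + 1) t := by
  rw [pvNewList]
  simp [hk]

lemma pvStepA_at_one (venc cp cu : String) (l : String) :
    pvStepA (venc, cp, cu, (1 : Int)) l = ((pvSplit l " ").headD "", cp, cu, 2) := rfl

lemma pvStepA_char (venc cp cu : String) (cont : Int) (h : cont ≠ 1) (l : String) :
    pvStepA (venc, cp, cu, cont) l =
      match pvExtrairCnpj l with
      | some c => (venc, if cp == "" then c else cp, c, cont + 1)
      | none => (venc, cp, cu, cont + 1) := by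
  have hb : (cont == 1) = false := by simp [h]
  show (if (cont == 1) = true then _ else _) = _
  rw [hb]
  simp only [Bool.false_eq_true, if_false]
  unfold pvExtrairCnpj
  by_cases hf : PySem.Str.find (PySem.Str.upper ((pvSplit l " ").headD "")) "TRABALHADORES" ≥ 0
  · rw [if_pos hf, if_pos hf]
    by_cases hd : PySem.Str.strIsdigit (PySem.Str.replace (PySem.Str.strip (PySem.Str.slice (PySem.Str.upper ((pvSplit l " ").headD "")) (some (-7)) none)) "-" "") = true
    · rw [if_pos hd, if_pos hd]
      by_cases hcp : (cp == "") = true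
      · simp [hcp]
      · simp [hcp]
    · rw [if_neg hd, if_neg hd]
  · rw [if_neg hf, if_neg hf]

lemma pvStrIsdigit_empty : PySem.Str.strIsdigit "" = false := rfl

lemma pvExtrair_ne_empty (l : String) (c : String) (h : pvExtrairCnpj l = some c) : c ≠ "" := by
  unfold pvExtrairCnpj at h
  split at h
  · split at h
    · rename_i hd
      rintro rfl
      rw [Option.some_inj] at h
      rw [h] at hd
      rw [pvStrIsdigit_empty] at hd
      simp at hd
    · simp at h
  · simp at h

lemma pvNewList_ne_empty (k : Nat) (rest : List String) :
    ∀ c ∈ pvNewList k rest, c ≠ "" := by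
  induction rest generalizing k with
  | nil => simp [pvNewList]
  | cons l t ih =>
    intro c hc
    rw [pvNewList] at hc
    split at hc
    · exact ih 2 c hc
    · split at hc
      · rename_i hsome
        rcases List.mem_cons.1 hc with rfl | hmem
        · exact pvExtrair_ne_empty l c hsome
        · exact ih _ c hmem
      · exact ih _ c hc

-- pvNewList is the filterMap of pvG over the enumeration starting at k
lemma pvNewList_eq_filterMap (rest : List String) (k : Int) (hk : 0 ≤ k) :
    pvNewList k.toNat rest = (PySem.List.enumerate rest k).filterMap pvG := by
  induction rest generalizing k with
  | nil => simp [pvNewList, PySem.List.enumerate_nil]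
  | cons l t ih =>
    rw [PySem.List.enumerate_cons, List.filterMap_cons]
    have htn : (k + 1).toNat = k.toNat + 1 := by omega
    by_cases h1 : k = 1
    · subst h1
      have : pvG (1, l) = none := by simp [pvG]
      rw [this]
      show pvNewList 1 (l :: t) = _
      rw [pvNewList_cons_one]
      have := ih 2 (by omega)
      simpa using this
    · have hkn : k.toNat ≠ 1 := by omega
      have hg : pvG (k, l) = pvExtrairCnpj l := by simp [pvG, h1]
      rw [hg, pvNewList_cons k.toNat hkn l t]
      cases hc : pvExtrairCnpj l with
      | none => rw [← htn, ih (k + 1) (by omega)]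
      | some c => rw [← htn, ih (k + 1) (by omega)]

-- pvBusca is the head of the same filterMap
lemma pvBusca_eq_head (ps : List (Int × String)) :
    pvBusca ps = (ps.filterMap pvG).head? := by
  induction ps with
  | nil => rfl
  | cons p rest ih =>
    rw [pvBusca, List.filterMap_cons]
    by_cases h1 : p.1 = 1
    · have : pvG p = none := by simp [pvG, h1]
      rw [this]
      simp [h1, ih]
    · have hg : pvG p = pvExtrairCnpj p.2 := by simp [pvG, h1]
      rw [hg]
      have hne : (p.1 != 1) = true := by simp [h1]
      rw [if_pos hne]
      cases hc : pvExtrairCnpj p.2 with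
      | none => simp [ih]
      | some c => simp

lemma pvLenCast (k : Nat) (l : String) (t : List String) :
    ((k + 1 : Nat) : Int) + (t.length : Int) = (k : Int) + ((l :: t).length : Int) := by
  push_cast [List.length_cons]; ring

lemma pvMain (rest : List String) (k : Nat) (venc cp cu : String) (acc : List String)
    (h1 : cp = acc.headD "") (h2 : cu = acc.getLastD "") (h3 : cp = "" ↔ acc = []) :
    rest.foldl pvStepA (venc, cp, cu, (k : Int)) =
      (pvVenc k rest venc,
       (acc ++ pvNewList k rest).headD "",
       (acc ++ pvNewList k rest).getLastD "",
       (k : Int) + rest.length) := by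
  induction rest generalizing k venc cp cu acc with
  | nil => simp [pvVenc, pvNewList, h1, h2]
  | cons l t ih =>
    simp only [List.foldl_cons]
    by_cases hk1 : k = 1
    · subst hk1
      rw [show ((1 : Nat) : Int) = (1 : Int) from rfl, pvStepA_at_one,
        show (2 : Int) = ((2 : Nat) : Int) from rfl,
        ih 2 _ cp cu acc h1 h2 h3]
      rw [show pvVenc 2 t ((pvSplit l " ").headD "") = (pvSplit l " ").headD "" from
            by cases t <;> simp [pvVenc],
          show pvVenc 1 (l :: t) venc = (pvSplit l " ").headD "" from by simp [pvVenc],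
          pvNewList_cons_one, pvLenCast 1 l t]
      norm_num
    · have hkint : ((k : Int)) ≠ 1 := by omega
      rw [pvStepA_char venc cp cu (k : Int) hkint l]
      have hv : pvVenc (k + 1) t venc = pvVenc k (l :: t) venc := by
        match k, hk1 with
        | 0, _ => cases t <;> simp [pvVenc]
        | 1, h => exact absurd rfl h
        | (n + 2), _ => cases t <;> simp [pvVenc]
      have hcast : (k : Int) + 1 = ((k + 1 : Nat) : Int) := by push_cast; ring
      cases hc : pvExtrairCnpj l with
      | none =>
        simp only [hc]
        rw [hcast, ih (k + 1) venc cp cu acc h1 h2 h3, pvNewList_cons k hk1 l t]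
        simp only [hc]
        rw [hv, pvLenCast k l t]
      | some c =>
        simp only [hc]
        have hcne : c ≠ "" := pvExtrair_ne_empty l c hc
        rw [pvNewList_cons k hk1 l t]
        simp only [hc]
        by_cases hcp : cp = ""
        · have hacc : acc = [] := h3.1 hcp
          subst hacc
          simp only [show (cp == "") = true by simp [hcp], if_true]
          rw [hcast, ih (k + 1) venc c c [c] (by simp) (by simp) (by simp [hcne])]
          simp only [List.nil_append]
          rw [hv, pvLenCast k l t]
          simp only [List.singleton_append]
        · have haccne : acc ≠ [] := fun h => hcp (h3.2 h)
          simp only [show (cp == "") = false by simp [hcp], Bool.false_eq_true, if_false]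
          rw [hcast, ih (k + 1) venc cp c (acc ++ [c])
            (by rw [h1]; cases acc with | nil => exact absurd rfl haccne | cons a t => simp)
            (by simp)
            (by constructor
                · intro h; exact absurd h hcp
                · intro h; simp at h)]
          simp only [List.append_assoc, List.singleton_append]
          rw [hv, pvLenCast k l t]

-- ===== VERDICT (by name: the statement is the Claim_ definition above) =====
theorem get_nome_arquivo_tipo_de_valor_spec : Claim_equal_get_nome_arquivo_tipo_de_valor := by
  intro numero_pagina texto _
  unfold Spec_get_nome_arquivo_tipo_de_valor
  unfold get_nome_arquivo_tipo_de_valor get_nome_arquivo_tipo_de_valor_alt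
  dsimp only
  generalize pvSplit texto "\n" = linhas
  have hmain := pvMain linhas 0 "" "" "" [] (by simp) (by simp) (by simp)
  rw [show ((0 : Nat) : Int) = (0 : Int) from rfl] at hmain
  simp only [List.nil_append] at hmain
  rw [hmain]
  set N := pvNewList 0 linhas with hN
  have hfm : N = (PySem.List.enumerate linhas 0).filterMap pvG := by
    rw [hN, show (0 : Nat) = (0 : Int).toNat from rfl]
    exact pvNewList_eq_filterMap linhas 0 (by norm_num)
  have hbusca : pvBusca (PySem.List.enumerate linhas 0) = N.head? := by
    rw [pvBusca_eq_head, ← hfm]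
  have hbuscaRev : pvBusca (PySem.List.enumerate linhas 0).reverse = N.getLast? := by
    rw [pvBusca_eq_head, List.filterMap_reverse, ← hfm, List.head?_reverse]
  have hv : pvVenc 0 linhas "" =
      (if 1 < linhas.length then (pvSplit (linhas.getD 1 "") " ").headD "" else "") := by
    rcases linhas with _ | ⟨a, _ | ⟨b, t⟩⟩
    · rw [if_neg (by norm_num)]; rfl
    · rw [if_neg (by norm_num)]; rfl
    · rw [if_pos (by simp)]; rfl
  rw [hv, hbusca, hbuscaRev]
  have hne := pvNewList_ne_empty 0 linhas
  cases hNc : N with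
  | nil => simp
  | cons c t =>
    have hcne : c ≠ "" := hne c (by rw [← hN, hNc]; simp)
    have hb1 : (c == "") = false := by simp [hcne]
    simp only [List.head?_cons, List.headD_cons, hb1, Bool.false_eq_true, if_false,
      List.getLastD_eq_getLast?]
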